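-- pv_equiv track=rewrite | github.com/iamibi/RSA-Cryptographic-Algorithm | DecryptMessage.py | GetTextFromBlocks
-- ===== SOURCE A (Python) =====
-- DEFAULT = 128               #default block size
--
-- BYTE_SIZE = 256             #One byte contains 256 values according to ASCII
--
-- def GetTextFromBlocks(decryptedBlocks, messageLen, blockSize = DEFAULT):
--     message = []
--
--     for blockInt in decryptedBlocks:
--         blockMessage = []
--
--         #Start the loop from end of the current block as ASCII numbers
--         #are extracted from backwards from blockInt
--         for i in range(blockSize - 1, -1, -1):
--
--             #have we completed the message yet ?
--             if (len(message) + i < messageLen):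
--                 asciiVal = blockInt // (BYTE_SIZE ** i)
--                 blockInt = blockInt % (BYTE_SIZE ** i)
--                 blockMessage.insert(0, chr(asciiVal))           #Set the blockMessage list to insert the character always at starting
--
--         message.extend(blockMessage)                            #append the message list
--
--     #join() only works with strings
--     return ''.join(message)
-- ===== SOURCE B (Python) =====
-- DEFAULT = 128               #default block size
--
-- BYTE_SIZE = 256             #One byte contains 256 values according to ASCII
--
-- def GetTextFromBlocks(decryptedBlocks, messageLen, blockSize = DEFAULT):
--     # Single divmod pass per block (O(blockSize) small-int steps instead of
--     # A's O(blockSize) bigint powers/divisions per block), appending in order.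
--     chars = []
--     remaining = messageLen
--     for blockInt in decryptedBlocks:
--         k = min(blockSize, remaining)
--         if k < 0:
--             k = 0
--         for _ in range(k - 1):
--             blockInt, r = divmod(blockInt, BYTE_SIZE)
--             chars.append(chr(r))
--         if k >= 1:
--             chars.append(chr(blockInt))
--         remaining -= k
--     return ''.join(chars)
-- ===== Notes on version B (the rewrite author's own statement) =====
-- stated objective: faster
-- what changed: Replaces the per-character recomputation of 256**i with floordiv/mod on the full block (and insert(0) into a list) by a single low-to-high divmod pass per block that appends characters in order, tracking the remaining message length instead of re-reading len(message).
import Mathlib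
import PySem

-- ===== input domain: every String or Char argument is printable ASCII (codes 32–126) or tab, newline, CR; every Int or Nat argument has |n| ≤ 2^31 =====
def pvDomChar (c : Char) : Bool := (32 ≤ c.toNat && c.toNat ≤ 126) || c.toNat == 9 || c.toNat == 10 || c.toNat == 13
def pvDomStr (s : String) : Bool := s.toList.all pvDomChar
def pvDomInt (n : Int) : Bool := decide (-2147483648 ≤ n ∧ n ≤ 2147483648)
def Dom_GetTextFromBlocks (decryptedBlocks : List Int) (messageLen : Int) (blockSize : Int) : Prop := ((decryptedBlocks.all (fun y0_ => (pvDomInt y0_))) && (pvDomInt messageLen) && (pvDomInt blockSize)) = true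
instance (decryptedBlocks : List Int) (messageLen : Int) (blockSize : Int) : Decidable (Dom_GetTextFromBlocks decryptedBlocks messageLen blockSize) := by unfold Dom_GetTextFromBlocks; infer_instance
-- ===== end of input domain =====

-- B replaces A's per-character bigint power/floordiv and insert(0) with one low-to-high
-- divmod pass per block, appending characters in order (objective: faster).

-- ===== PORT A =====
-- chr(v) is ported as Char.ofNat v.toNat: exact for 0 ≤ v < 0x110000 outside the
-- surrogate range, which Pre_ guarantees for every chr argument A reaches.
-- 256 ** i is ported as 256 ^ i.toNat: exact since every i of A's range here is ≥ 0.
def GetTextFromBlocks (decryptedBlocks : List Int) (messageLen : Int) (blockSize : Int) : String :=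
  let message : List Char := decryptedBlocks.foldl (fun message blockInt =>
    let st := (PySem.List.pyRange (blockSize - 1) (-1) (-1)).foldl
      (fun (st : Int × List Char) i =>
        if (message.length : Int) + i < messageLen then
          let asciiVal := PySem.Int.floordiv st.1 ((256 : Int) ^ i.toNat)
          let blockInt' := PySem.Int.mod st.1 ((256 : Int) ^ i.toNat)
          (blockInt', PySem.List.insert st.2 0 (Char.ofNat asciiVal.toNat))
        else st)
      (blockInt, ([] : List Char))
    message ++ st.2) []
  String.ofList message

-- ===== PORT B =====
def GetTextFromBlocks_alt (decryptedBlocks : List Int) (messageLen : Int) (blockSize : Int) : String :=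
  let st := decryptedBlocks.foldl (fun (st : List Char × Int) blockInt =>
    let k0 := min blockSize st.2
    let k := if k0 < 0 then 0 else k0
    let inner := (PySem.List.pyRange 0 (k - 1) 1).foldl
      (fun (p : Int × List Char) _ =>
        (PySem.Int.floordiv p.1 256, p.2 ++ [Char.ofNat (PySem.Int.mod p.1 256).toNat]))
      (blockInt, st.1)
    let chars := if 1 ≤ k then inner.2 ++ [Char.ofNat inner.1.toNat] else inner.2
    (chars, st.2 - k))
    (([] : List Char), messageLen)
  String.ofList st.1

-- ===== PRECONDITION & SPEC =====
-- Pre_ excludes the inputs where Python A raises (chr on a negative or ≥ 0x110000 digit)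
-- and the inputs where the top digit of some block lands in the surrogate range
-- 0xD800–0xDFFF: there A returns a lone-surrogate string that a Lean String cannot
-- represent. The min/max expression below is exactly the number of characters A
-- extracts from block m, and the division is that block's top extracted digit.
def Pre_GetTextFromBlocks (decryptedBlocks : List Int) (messageLen : Int) (blockSize : Int) : Prop :=
  ∀ m < decryptedBlocks.length,
    (min (max blockSize 0) (max (messageLen - m * blockSize) 0)) ≤ 0 ∨
    (0 ≤ decryptedBlocks.getD m 0 ∧
      (decryptedBlocks.getD m 0 / 256 ^ ((min (max blockSize 0) (max (messageLen - m * blockSize) 0)) - 1).toNat < 0xD800 ∨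
       (0xE000 ≤ decryptedBlocks.getD m 0 / 256 ^ ((min (max blockSize 0) (max (messageLen - m * blockSize) 0)) - 1).toNat ∧
        decryptedBlocks.getD m 0 / 256 ^ ((min (max blockSize 0) (max (messageLen - m * blockSize) 0)) - 1).toNat < 0x110000)))
instance (decryptedBlocks : List Int) (messageLen : Int) (blockSize : Int) : Decidable (Pre_GetTextFromBlocks decryptedBlocks messageLen blockSize) := by unfold Pre_GetTextFromBlocks; infer_instance

def pvWitness_GetTextFromBlocks : List Int × Int × Int := ([18533, 33], 3, 2)

def Spec_GetTextFromBlocks (decryptedBlocks : List Int) (messageLen : Int) (blockSize : Int) (out : String) : Prop := out = GetTextFromBlocks_alt decryptedBlocks messageLen blockSize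
instance (decryptedBlocks : List Int) (messageLen : Int) (blockSize : Int) (out : String) : Decidable (Spec_GetTextFromBlocks decryptedBlocks messageLen blockSize out) := by unfold Spec_GetTextFromBlocks; infer_instance

-- ===== CLAIM (what is proved, stated in full; the proofs are below) =====
def Claim_equal_GetTextFromBlocks : Prop := ∀ (decryptedBlocks : List Int) (messageLen : Int) (blockSize : Int), Dom_GetTextFromBlocks decryptedBlocks messageLen blockSize → Pre_GetTextFromBlocks decryptedBlocks messageLen blockSize → Spec_GetTextFromBlocks decryptedBlocks messageLen blockSize (GetTextFromBlocks decryptedBlocks messageLen blockSize)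

-- ===== LEMMAS AND PROOFS =====
-- The equality of the two ports is in fact unconditional (both apply Char.ofNat,
-- total in Lean, to the same integers); the proof below does not need Pre_, whose
-- role is to delimit the inputs on which both ports are faithful to their Pythons.

def pvLow (b : Int) : Nat → List Char
  | 0 => []
  | m + 1 => Char.ofNat (b % 256).toNat :: pvLow (b / 256) m

def pvDivIter (b : Int) : Nat → Int
  | 0 => b
  | m + 1 => pvDivIter (b / 256) m

def pvPiece (b : Int) (k : Nat) : List Char :=
  match k with
  | 0 => []
  | m + 1 => pvLow b m ++ [Char.ofNat (pvDivIter b m).toNat]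

def pvPieceTD (b : Int) (k : Nat) : List Char :=
  match k with
  | 0 => []
  | m + 1 => pvPieceTD (b % (256 : Int) ^ m) m ++ [Char.ofNat (b / (256 : Int) ^ m).toNat]

def pvDesc : Nat → List Int
  | 0 => []
  | n + 1 => (n : Int) :: pvDesc n

lemma pv_emod_mul_ediv (b c S : Int) (hc : 0 < c) : (b % (c * S)) / c = (b / c) % S := by
  have h1 : b / (c * S) = b / c / S := (Int.ediv_ediv_of_nonneg hc.le).symm
  rw [Int.emod_def b (c * S), Int.emod_def (b / c) S, h1]
  have h2 : b - c * S * (b / c / S) = b + c * (-(S * (b / c / S))) := by ring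
  rw [h2, Int.add_mul_ediv_left b _ hc.ne']
  ring

lemma pvDivIter_eq (m : Nat) : ∀ b : Int, pvDivIter b m = b / 256 ^ m := by
  induction m with
  | zero => intro b; simp [pvDivIter]
  | succ m ih =>
    intro b
    rw [pvDivIter, ih, Int.ediv_ediv_of_nonneg (by norm_num), pow_succ']

lemma pvLow_length (m : Nat) : ∀ b : Int, (pvLow b m).length = m := by
  induction m with
  | zero => intro b; simp [pvLow]
  | succ m ih => intro b; simp [pvLow, ih]

lemma pvLow_snoc (m : Nat) : ∀ b : Int,
    pvLow b (m + 1) = pvLow b m ++ [Char.ofNat ((b / 256 ^ m % 256)).toNat] := by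
  induction m with
  | zero => intro b; simp [pvLow]
  | succ m ih =>
    intro b
    rw [pvLow, ih, pvLow]
    rw [Int.ediv_ediv_of_nonneg (by norm_num), ← pow_succ']
    simp

lemma pvLow_mod (m : Nat) : ∀ (b T : Int), 0 < T →
    pvLow (b % (256 ^ m * T)) m = pvLow b m := by
  induction m with
  | zero => intro b T _; rfl
  | succ m ih =>
    intro b T hT
    have hsplit : (256 : Int) ^ (m + 1) * T = 256 * (256 ^ m * T) := by ring
    rw [pvLow, pvLow, hsplit,
      Int.emod_emod_of_dvd b ⟨256 ^ m * T, by ring⟩,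
      pv_emod_mul_ediv b 256 (256 ^ m * T) (by norm_num),
      ih (b / 256) T hT]

lemma pvPieceTD_eq (k : Nat) : ∀ b : Int, pvPieceTD b k = pvPiece b k := by
  induction k with
  | zero => intro b; rfl
  | succ m ih =>
    intro b
    rw [pvPieceTD, ih]
    match m with
    | 0 => simp [pvPiece, pvLow, pvDivIter]
    | j + 1 =>
      rw [pvPiece]
      have hp : (256 : Int) ^ (j + 1) = 256 ^ j * 256 := by rw [pow_succ]
      rw [hp, pvLow_mod j b 256 (by norm_num), pvDivIter_eq,
        pv_emod_mul_ediv b (256 ^ j) 256 (by positivity)]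
      rw [pvPiece, pvLow_snoc, pvDivIter_eq]
      have hd : b / 256 ^ j / 256 = b / (256 ^ j * 256) := Int.ediv_ediv_of_nonneg (by positivity)
      rw [← hp]

lemma pvPiece_length (b : Int) (k : Nat) : (pvPiece b k).length = k := by
  cases k with
  | zero => rfl
  | succ m => simp [pvPiece, pvLow_length]

lemma pvDesc_eq (n : Nat) : pvDesc n = (List.range n).map (fun k : Nat => (n : Int) - 1 - (k : Int)) := by
  induction n with
  | zero => rfl
  | succ n ih =>
    rw [pvDesc, List.range_succ_eq_map, List.map_cons, List.map_map, ih]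
    refine congrArg₂ _ (by push_cast; ring) (List.map_congr_left fun k _ => ?_)
    simp [Function.comp]
    ring

lemma pv_pyRange_desc (bs : Int) :
    PySem.List.pyRange (bs - 1) (-1) (-1) = pvDesc bs.toNat := by
  rw [pvDesc_eq]
  unfold PySem.List.pyRange
  by_cases h : 0 < bs
  · have h1 : (-1 : Int) < bs - 1 := by omega
    simp only [if_neg (by norm_num : ¬ ((-1:Int) = 0)), if_neg (by norm_num : ¬ (0 < (-1:Int))), if_pos h1]
    have h2 : (bs - 1 - -1 + - -1 - 1) / - -1 = bs := by norm_num
    rw [h2, Int.toNat_of_nonneg h.le]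
    exact List.map_congr_left fun k _ => by ring
  · have h1 : ¬ ((-1 : Int) < bs - 1) := by omega
    have h2 : bs.toNat = 0 := by omega
    simp [h1, h2]

lemma pv_foldA_inner (L mL : Int) (n : Nat) : ∀ (b : Int) (acc : List Char),
    ((pvDesc n).foldl
      (fun (st : Int × List Char) i =>
        if L + i < mL then
          (PySem.Int.mod st.1 ((256 : Int) ^ i.toNat),
           PySem.List.insert st.2 0 (Char.ofNat (PySem.Int.floordiv st.1 ((256 : Int) ^ i.toNat)).toNat))
        else st) (b, acc)).2
    = pvPieceTD b (min n (mL - L).toNat) ++ acc := by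
  induction n with
  | zero => intro b acc; simp [pvDesc, pvPieceTD]
  | succ n ih =>
    intro b acc
    rw [pvDesc, List.foldl_cons]
    by_cases h : L + (n : Int) < mL
    · rw [if_pos h]
      have hpos : (0 : Int) < 256 ^ ((n : Int)).toNat := by positivity
      rw [PySem.Int.mod_eq_emod_of_pos hpos, PySem.Int.floordiv_eq_ediv_of_pos hpos,
        PySem.List.insert_zero, ih]
      have ht : (n : Int).toNat = n := Int.toNat_natCast n
      have h1 : min n (mL - L).toNat = n := by omega
      have h2 : min (n + 1) (mL - L).toNat = n + 1 := by omega
      rw [ht, h1, h2, pvPieceTD]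
      simp
    · rw [if_neg h, ih]
      have h3 : min (n + 1) (mL - L).toNat = min n (mL - L).toNat := by omega
      rw [h3]

lemma pv_foldB_inner (l : List Int) : ∀ (b : Int) (acc : List Char),
    l.foldl
      (fun (p : Int × List Char) _ =>
        (PySem.Int.floordiv p.1 256, p.2 ++ [Char.ofNat (PySem.Int.mod p.1 256).toNat])) (b, acc)
    = (pvDivIter b l.length, acc ++ pvLow b l.length) := by
  induction l with
  | nil => intro b acc; simp [pvDivIter, pvLow]
  | cons x l ih =>
    intro b acc
    rw [List.foldl_cons, ih,
      PySem.Int.mod_eq_emod_of_pos (by norm_num), PySem.Int.floordiv_eq_ediv_of_pos (by norm_num)]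
    simp [List.length_cons, pvDivIter, pvLow]

def pvAstep (mL bs : Int) : List Char → Int → List Char := fun message blockInt =>
  message ++ ((PySem.List.pyRange (bs - 1) (-1) (-1)).foldl
      (fun (st : Int × List Char) i =>
        if (message.length : Int) + i < mL then
          (PySem.Int.mod st.1 ((256 : Int) ^ i.toNat),
           PySem.List.insert st.2 0 (Char.ofNat (PySem.Int.floordiv st.1 ((256 : Int) ^ i.toNat)).toNat))
        else st) (blockInt, ([] : List Char))).2

def pvBstep (bs : Int) : List Char × Int → Int → List Char × Int := fun st blockInt =>
  let k0 := min bs st.2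
  let k := if k0 < 0 then 0 else k0
  let inner := (PySem.List.pyRange 0 (k - 1) 1).foldl
    (fun (p : Int × List Char) _ =>
      (PySem.Int.floordiv p.1 256, p.2 ++ [Char.ofNat (PySem.Int.mod p.1 256).toNat]))
    (blockInt, st.1)
  let chars := if 1 ≤ k then inner.2 ++ [Char.ofNat inner.1.toNat] else inner.2
  (chars, st.2 - k)

lemma pv_outer (mL bs : Int) (l : List Int) : ∀ (msg : List Char) (rem : Int),
    rem = mL - msg.length →
    l.foldl (pvAstep mL bs) msg = (l.foldl (pvBstep bs) (msg, rem)).1 := by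
  induction l with
  | nil => intro msg rem _; rfl
  | cons x l ih =>
    intro msg rem hrem
    rw [List.foldl_cons, List.foldl_cons]
    have hA : pvAstep mL bs msg x
        = msg ++ pvPiece x (min bs.toNat (mL - (msg.length : Int)).toNat) := by
      unfold pvAstep
      rw [pv_pyRange_desc bs, pv_foldA_inner, pvPieceTD_eq]
      simp
    have hklen : (PySem.List.pyRange 0 ((if min bs rem < 0 then 0 else min bs rem) - 1) 1).length
        = ((if min bs rem < 0 then 0 else min bs rem) - 1).toNat := by
      rw [PySem.List.length_pyRange_one]; norm_num
    set K := min bs.toNat (mL - (msg.length : Int)).toNat with hKdef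
    have hB : pvBstep bs (msg, rem) x = (msg ++ pvPiece x K, rem - (K : Int)) := by
      simp only [pvBstep]
      rw [pv_foldB_inner, hklen]
      by_cases hneg : min bs rem < 0
      · rw [if_pos hneg]
        have hK0 : K = 0 := by omega
        have hz : ((0 : Int) - 1).toNat = 0 := by omega
        rw [if_neg (by norm_num : ¬ (1 : Int) ≤ 0), hK0, hz]
        simp [pvPiece, pvLow]
      · rw [if_neg hneg]
        by_cases hk1 : 1 ≤ min bs rem
        · rw [if_pos hk1]
          have h1 : K = (min bs rem - 1).toNat + 1 := by omega
          rw [h1, pvPiece]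
          refine Prod.ext ?_ ?_
          · simp
          · simp; omega
        · rw [if_neg hk1]
          have h0 : min bs rem = 0 := by omega
          have hK0 : K = 0 := by omega
          have hz : ((0 : Int) - 1).toNat = 0 := by omega
          rw [h0, hK0, hz]
          simp [pvPiece, pvLow]
    rw [hA, hB]
    refine ih _ _ ?_
    simp [pvPiece_length]
    omega

-- ===== VERDICT (by name: the statement is the Claim_ definition above) =====
theorem GetTextFromBlocks_spec : Claim_equal_GetTextFromBlocks := by
  intro d mL bs _ _
  unfold Spec_GetTextFromBlocks GetTextFromBlocks GetTextFromBlocks_alt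
  exact congrArg String.ofList (pv_outer mL bs d [] mL (by simp))
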